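-- pv_equiv track=rewrite | github.com/pepze21/Coding_practice_Programers | mujieui_meokbang_raibeu.py | solution
-- ===== SOURCE A (Python) =====
-- def solution(food_times, k):
--     if sum(food_times) <= k:
--         return -1
--
--     length = len(food_times)
--     l = k // length # lower bound
--     u = max(food_times) # upper bound
--
--     while (u - l > 1):
--         m = (l + u) // 2
--         s = 0
--         for i in range(length):
--             if food_times[i] < m:
--                 s += food_times[i]
--             else:
--                 s += m
--         if s <= k:
--             l = m
--         else:
--             u = m
--
--     s = 0
--     for i in range(length):
--         if food_times[i] < l:
--             s += food_times[i]
--         else: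
--             s += l
--
--     cnt = 0
--     for i, time in enumerate(food_times):
--         if time > l:
--             if cnt == k - s:
--                 return i + 1
--             cnt += 1
-- ===== SOURCE B (Python) =====
-- def solution(food_times, k):
--     total = sum(food_times)
--     if total <= k:
--         return -1
--     n = len(food_times)
--     # Walk the sorted eating times tier by tier: a food of time t is finished
--     # once the common level passes t.  `eaten` = seconds spent on finished
--     # foods, `rem` = number of foods still in rotation.
--     eaten = 0
--     rem = n
--     for t in sorted(food_times):
--         if eaten + rem * t <= k:
--             eaten += t
--             rem -= 1
--         else:
--             break
--     # final level l: largest level with total consumed time <= k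
--     l = (k - eaten) // rem
--     r = k - (eaten + rem * l)
--     survivors = [i for i, t in enumerate(food_times) if t > l]
--     return survivors[r] + 1
-- ===== Notes on version B (the rewrite author's own statement) =====
-- stated objective: alternative
-- what changed: Replaces A's binary search over the eating level (each probe re-summing min(t,level) over the whole list) by a single sort followed by one linear walk over the sorted tiers that finds the final level and the offset directly.
import Mathlib
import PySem

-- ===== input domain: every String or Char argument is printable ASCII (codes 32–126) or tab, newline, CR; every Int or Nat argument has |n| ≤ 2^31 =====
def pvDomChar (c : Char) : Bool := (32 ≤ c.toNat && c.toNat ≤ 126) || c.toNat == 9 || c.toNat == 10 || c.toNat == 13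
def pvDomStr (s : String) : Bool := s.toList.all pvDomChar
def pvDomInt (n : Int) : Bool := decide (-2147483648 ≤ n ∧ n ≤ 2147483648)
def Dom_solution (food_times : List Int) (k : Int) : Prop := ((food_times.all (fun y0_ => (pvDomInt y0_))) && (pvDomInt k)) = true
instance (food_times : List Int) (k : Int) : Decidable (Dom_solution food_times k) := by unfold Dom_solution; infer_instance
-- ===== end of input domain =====

-- B replaces A's binary search on the eating level by one sort plus a linear walk
-- over the sorted tiers (an 'alternative' algorithm of similar cost).
-- ===== PORT A =====

-- s = 0; for i in range(length): s += food_times[i] if food_times[i] < m else m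
def pySumMin (food_times : List Int) (m : Int) : Int :=
  (PySem.List.pyRange 0 (food_times.length : Int) 1).foldl
    (fun s i => if PySem.List.pyGetD food_times i 0 < m then s + PySem.List.pyGetD food_times i 0 else s + m) 0

-- the while (u - l > 1) binary-search loop
def pyBisect (food_times : List Int) (k l u : Int) : Int :=
  if u - l > 1 then
    let m := PySem.Int.floordiv (l + u) 2
    if pySumMin food_times m ≤ k then pyBisect food_times k m u else pyBisect food_times k l m
  else l
termination_by (u - l).toNat
decreasing_by
  all_goals
    simp only [PySem.Int.floordiv_eq_ediv_of_pos (by norm_num : (0:Int) < 2)] at *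
    omega

-- cnt = 0; for i, time in enumerate(food_times): …  (none = the loop falls through)
def pyFind (l target : Int) : List (Int × Int) → Int → Option Int
  | [], _ => none
  | (i, t) :: rest, cnt =>
    if t > l then
      if cnt = target then some (i + 1)
      else pyFind l target rest (cnt + 1)
    else pyFind l target rest cnt

def solution (food_times : List Int) (k : Int) : Int :=
  if food_times.sum ≤ k then -1
  else
    let length : Int := food_times.length
    let l := PySem.Int.floordiv k length
    let u := (PySem.List.max? food_times (fun t => t)).getD 0
    let lf := pyBisect food_times k l u
    let s := pySumMin food_times lf
    (pyFind lf (k - s) (PySem.List.enumerate food_times) 0).getD 0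

-- ===== PORT B =====

-- the for-loop over sorted(food_times) with break; returns (eaten, rem)
def altGo (k : Int) : List Int → Int → Int → Int × Int
  | [], eaten, rem => (eaten, rem)
  | t :: ts, eaten, rem =>
    if eaten + rem * t ≤ k then altGo k ts (eaten + t) (rem - 1) else (eaten, rem)

def solution_alt (food_times : List Int) (k : Int) : Int :=
  if food_times.sum ≤ k then -1
  else
    let n : Int := food_times.length
    let er := altGo k (PySem.List.sorted food_times (fun t => t) false) 0 n
    let l := PySem.Int.floordiv (k - er.1) er.2
    let r := k - (er.1 + er.2 * l)
    let survivors := ((PySem.List.enumerate food_times).filter (fun p => p.2 > l)).map (fun p => p.1)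
    (PySem.List.pyGet? survivors r).getD 0 + 1

-- ===== PRECONDITION & SPEC =====
-- Pre_ excludes only (food_times = [], k < 0), where A raises ZeroDivisionError
-- (k // len(food_times)) — B raises ZeroDivisionError there as well.
def Pre_solution (food_times : List Int) (k : Int) : Prop := food_times ≠ [] ∨ 0 ≤ k
instance (food_times : List Int) (k : Int) : Decidable (Pre_solution food_times k) := by unfold Pre_solution; infer_instance
def pvWitness_solution : List Int × Int := ([3, 1, 2], 5)
def Spec_solution (food_times : List Int) (k : Int) (out : Int) : Prop := out = solution_alt food_times k
instance (food_times : List Int) (k : Int) (out : Int) : Decidable (Spec_solution food_times k out) := by unfold Spec_solution; infer_instance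

-- ===== CLAIM (what is proved, stated in full; the proofs are below) =====
def Claim_equal_solution : Prop := ∀ (food_times : List Int) (k : Int), Dom_solution food_times k → Pre_solution food_times k → Spec_solution food_times k (solution food_times k)

-- ===== LEMMAS AND PROOFS =====

-- pySumMin as a sum of clamped values
theorem pySumMin_eq_map (ft : List Int) (m : Int) :
    pySumMin ft m = (ft.map (fun t => min t m)).sum := by
  unfold pySumMin
  rw [PySem.List.foldl_pyRange_zero_pyGetD' ft 0
        (fun s t => if t < m then s + t else s + m) 0]
  induction ft using List.reverseRecOn with
  | nil => simp
  | append_singleton xs x ih =>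
      simp only [List.foldl_append, List.foldl_cons, List.foldl_nil, List.map_append,
        List.sum_append, List.map_cons, List.map_nil, List.sum_cons, List.sum_nil, ih]
      rcases lt_or_ge x m with h | h
      · simp [h, min_eq_left h.le]
      · simp [not_lt.2 h, min_eq_right h]

theorem pySumMin_mono (ft : List Int) {a b : Int} (h : a ≤ b) :
    pySumMin ft a ≤ pySumMin ft b := by
  rw [pySumMin_eq_map, pySumMin_eq_map]
  exact List.sum_le_sum (fun t _ => min_le_min le_rfl h)

theorem pySumMin_perm {ft gs : List Int} (h : ft.Perm gs) (m : Int) :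
    pySumMin ft m = pySumMin gs m := by
  rw [pySumMin_eq_map, pySumMin_eq_map]
  exact (h.map _).sum_eq

theorem pySumMin_le_len_mul (ft : List Int) (m : Int) :
    pySumMin ft m ≤ (ft.length : Int) * m := by
  rw [pySumMin_eq_map]
  induction ft with
  | nil => simp
  | cons t ts ih =>
      simp only [List.map_cons, List.sum_cons, List.length_cons]
      push_cast
      have : min t m ≤ m := min_le_right _ _
      nlinarith [ih]

theorem pySumMin_eq_sum_of_le (ft : List Int) (m : Int) (h : ∀ t ∈ ft, t ≤ m) :
    pySumMin ft m = ft.sum := by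
  rw [pySumMin_eq_map]
  induction ft with
  | nil => simp
  | cons t ts ih =>
      simp only [List.map_cons, List.sum_cons]
      rw [min_eq_left (h t List.mem_cons_self), ih (fun s hs => h s (List.mem_cons_of_mem _ hs))]

-- S(l+1) - S(l) counts the foods with time > l
theorem pySumMin_succ (ft : List Int) (m : Int) :
    pySumMin ft (m + 1) = pySumMin ft m + ((ft.filter (fun t => m < t)).length : Int) := by
  rw [pySumMin_eq_map, pySumMin_eq_map]
  induction ft with
  | nil => simp
  | cons t ts ih =>
      simp only [List.map_cons, List.sum_cons, List.filter_cons]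
      rcases lt_or_ge m t with h' | h'
      · have h1 : min t (m + 1) = m + 1 := min_eq_right (by omega)
        have h2 : min t m = m := min_eq_right (by omega)
        simp only [h1, h2, h', decide_true, if_true, List.length_cons]
        push_cast
        omega
      · have h1 : min t (m + 1) = t := min_eq_left (by omega)
        have h2 : min t m = t := min_eq_left (by omega)
        have h3 : ¬ (m < t) := by omega
        simp only [h1, h2, h3, decide_false, Bool.false_eq_true, if_false]
        omega

-- a split of the (sorted) list around level x evaluates S(x) in closed form
theorem pySumMin_split (p q : List Int) (x : Int)
    (hp : ∀ t ∈ p, t ≤ x) (hq : ∀ t ∈ q, x ≤ t) :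
    pySumMin (p ++ q) x = p.sum + (q.length : Int) * x := by
  rw [pySumMin_eq_map]
  induction p with
  | nil =>
      simp only [List.nil_append, List.sum_nil, zero_add]
      induction q with
      | nil => simp
      | cons t ts ih =>
          simp only [List.map_cons, List.sum_cons, List.length_cons]
          rw [min_eq_right (hq t List.mem_cons_self), ih (fun s hs => hq s (List.mem_cons_of_mem _ hs))]
          push_cast; ring
  | cons t ts ih =>
      simp only [List.cons_append, List.map_cons, List.sum_cons] at *
      rw [min_eq_left (hp t (List.mem_cons_self)), ih (fun s hs => hp s (List.mem_cons_of_mem _ hs))]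
      ring

-- the binary search lands on the unique l with S(l) ≤ k < S(l+1)
theorem pyBisect_spec (ft : List Int) (k : Int) :
    ∀ (n : Nat) (l u : Int), (u - l).toNat ≤ n → pySumMin ft l ≤ k → ¬ pySumMin ft u ≤ k →
      pySumMin ft (pyBisect ft k l u) ≤ k ∧ k < pySumMin ft (pyBisect ft k l u + 1) := by
  intro n
  induction n with
  | zero =>
      intro l u hn hl hu
      have hgt : ¬ (u - l > 1) := by omega
      rw [pyBisect, if_neg hgt]
      refine ⟨hl, ?_⟩
      have := pySumMin_mono ft (show u ≤ l + 1 by omega)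
      omega
  | succ n ih =>
      intro l u hn hl hu
      by_cases hgt : u - l > 1
      · have hM : PySem.Int.floordiv (l + u) 2 = (l + u) / 2 :=
          PySem.Int.floordiv_eq_ediv_of_pos (by norm_num)
        have hMb : l + 1 ≤ PySem.Int.floordiv (l + u) 2 ∧ PySem.Int.floordiv (l + u) 2 ≤ u - 1 := by
          rw [hM]; omega
        have hstep : pyBisect ft k l u =
            if pySumMin ft (PySem.Int.floordiv (l + u) 2) ≤ k then
              pyBisect ft k (PySem.Int.floordiv (l + u) 2) u
            else pyBisect ft k l (PySem.Int.floordiv (l + u) 2) := by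
          rw [pyBisect, if_pos hgt]
        rw [hstep]
        by_cases hle : pySumMin ft (PySem.Int.floordiv (l + u) 2) ≤ k
        · rw [if_pos hle]
          exact ih _ u (by omega) hle hu
        · rw [if_neg hle]
          exact ih l _ (by omega) hl hle
      · rw [pyBisect, if_neg hgt]
        refine ⟨hl, ?_⟩
        have := pySumMin_mono ft (show u ≤ l + 1 by omega)
        omega

theorem level_uniq (ft : List Int) (k : Int) {a b : Int}
    (ha1 : pySumMin ft a ≤ k) (ha2 : k < pySumMin ft (a + 1))
    (hb1 : pySumMin ft b ≤ k) (hb2 : k < pySumMin ft (b + 1)) : a = b := by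
  rcases lt_trichotomy a b with h | h | h
  · have : a + 1 ≤ b := by omega
    have := pySumMin_mono ft this
    omega
  · exact h
  · have : b + 1 ≤ a := by omega
    have := pySumMin_mono ft this
    omega

-- B's walk over the sorted tiers reaches a state from which the final level
-- l = (k - eaten) // rem satisfies S(l) = eaten + rem·l and S(l) ≤ k < S(l+1)
theorem altGo_spec (ft : List Int) (k : Int) (hne : ft ≠ []) (hsum : k < ft.sum) :
    ∀ (q p : List Int) (eaten rem : Int),
      p ++ q = PySem.List.sorted ft (fun t => t) false →
      eaten = p.sum → rem = (q.length : Int) →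
      (∀ t ∈ p, eaten + rem * t ≤ k) →
      pySumMin ft (PySem.Int.floordiv (k - (altGo k q eaten rem).1) (altGo k q eaten rem).2)
          = (altGo k q eaten rem).1 + (altGo k q eaten rem).2 *
            (PySem.Int.floordiv (k - (altGo k q eaten rem).1) (altGo k q eaten rem).2) ∧
      pySumMin ft (PySem.Int.floordiv (k - (altGo k q eaten rem).1) (altGo k q eaten rem).2) ≤ k ∧
      k < pySumMin ft (PySem.Int.floordiv (k - (altGo k q eaten rem).1) (altGo k q eaten rem).2 + 1) := by
  intro q
  induction q with
  | nil =>
      intro p eaten rem hsplit he hr hp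
      exfalso
      simp only [List.append_nil] at hsplit
      have hperm : (p : List Int).Perm ft := by
        rw [hsplit]; exact PySem.List.sorted_perm ft _ _
      have hpne : p ≠ [] := by
        intro h
        rw [h] at hsplit
        exact hne ((PySem.List.sorted_eq_nil_iff _ _ _).1 hsplit.symm)
      obtain ⟨t, ht⟩ := List.exists_mem_of_ne_nil p hpne
      have h1 := hp t ht
      have h2 : eaten = ft.sum := by rw [he, hperm.sum_eq]
      simp only [List.length_nil, Nat.cast_zero] at hr
      rw [hr] at h1
      omega
  | cons t q' ih =>
      intro p eaten rem hsplit he hr hp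
      have hpair : (p ++ t :: q').Pairwise (· ≤ ·) := by
        rw [hsplit]
        simpa using PySem.List.sorted_pairwise ft (fun t => t)
      rw [List.pairwise_append] at hpair
      have hrpos : (0:Int) < rem := by
        rw [hr]; simp only [List.length_cons]; push_cast; omega
      by_cases hc : eaten + rem * t ≤ k
      · -- the tier is consumed
        rw [altGo, if_pos hc]
        have := ih (p ++ [t]) (eaten + t) (rem - 1)
          (by simpa using hsplit)
          (by simp [he])
          (by rw [hr]; simp only [List.length_cons]; push_cast; ring)
          ?_
        · exact this
        · intro t' ht'
          rcases List.mem_append.1 ht' with h | h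
          · have htt' : t' ≤ t := (hpair.2.2 t' h t List.mem_cons_self)
            have : (rem - 1) * t' ≤ (rem - 1) * t :=
              mul_le_mul_of_nonneg_left htt' (by omega)
            have := hp t' h
            nlinarith
          · simp only [List.mem_singleton] at h
            subst h
            nlinarith
      · -- break: the state is final
        rw [altGo, if_neg hc]
        simp only
        set l := PySem.Int.floordiv (k - eaten) rem with hl
        have hbl : l * rem ≤ k - eaten :=
          (PySem.Int.le_floordiv_iff_mul_le hrpos).1 le_rfl
        have hbu : k - eaten < (l + 1) * rem := by
          have h1 : l < l + 1 := by omega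
          exact (PySem.Int.floordiv_lt_iff_lt_mul hrpos).1 h1
        have hlt : l < t := by
          refine (PySem.Int.floordiv_lt_iff_lt_mul hrpos).2 ?_
          nlinarith
        have hple : ∀ t' ∈ p, t' ≤ l := by
          intro t' ht'
          refine (PySem.Int.le_floordiv_iff_mul_le hrpos).2 ?_
          have := hp t' ht'
          nlinarith
        have hqge : ∀ s ∈ t :: q', l + 1 ≤ s := by
          intro s hs
          rcases List.mem_cons.1 hs with h | h
          · omega
          · have := (List.pairwise_cons.1 hpair.2.1).1 s h
            omega
        have hperm : ft.Perm (p ++ t :: q') := by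
          refine (List.Perm.symm ?_)
          rw [hsplit]; exact PySem.List.sorted_perm ft _ _
        have hfml : ∀ x : Int, (∀ t' ∈ p, t' ≤ x) → (∀ s ∈ t :: q', x ≤ s) →
            pySumMin ft x = eaten + rem * x := by
          intro x h1 h2
          rw [pySumMin_perm hperm x, pySumMin_split p (t :: q') x h1 h2, he, hr]
        have hSl : pySumMin ft l = eaten + rem * l :=
          hfml l hple (fun s hs => by have := hqge s hs; omega)
        have hSl1 : pySumMin ft (l + 1) = eaten + rem * (l + 1) :=
          hfml (l + 1) (fun t' ht' => by have := hple t' ht'; omega) hqge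
        refine ⟨hSl, ?_, ?_⟩
        · rw [hSl]; nlinarith
        · rw [hSl1]; nlinarith

-- A's selection loop returns element #(target - cnt) of the surviving indices, +1
theorem pyFind_eq (l target : Int) :
    ∀ (pairs : List (Int × Int)) (cnt : Int) (j : Nat), target = cnt + (j : Int) →
      pyFind l target pairs cnt =
        (((pairs.filter (fun p => p.2 > l)).map (fun p => p.1))[j]?).map (· + 1) := by
  intro pairs
  induction pairs with
  | nil => intro cnt j h; simp [pyFind]
  | cons it rest ih =>
      intro cnt j h
      obtain ⟨i, t⟩ := it
      by_cases ht : t > l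
      · by_cases hcnt : cnt = target
        · have hj : j = 0 := by omega
          subst hj
          rw [show pyFind l target ((i, t) :: rest) cnt = some (i + 1) from by
            rw [pyFind, if_pos ht, if_pos hcnt]]
          simp [ht]
        · have hj : j ≠ 0 := by rintro rfl; simp at h; omega
          obtain ⟨j', rfl⟩ := Nat.exists_eq_succ_of_ne_zero hj
          rw [show pyFind l target ((i, t) :: rest) cnt = pyFind l target rest (cnt + 1) from by
            rw [pyFind, if_pos ht, if_neg hcnt]]
          rw [ih (cnt + 1) j' (by push_cast at h ⊢; omega)]
          simp [ht]
      · rw [show pyFind l target ((i, t) :: rest) cnt = pyFind l target rest cnt from by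
          rw [pyFind, if_neg ht]]
        rw [ih cnt j h]
        simp [ht]

-- filtering the survivors commutes with enumerate (same count)
theorem enum_filter_len (ft : List Int) (l : Int) :
    ∀ s : Int, (((PySem.List.enumerate ft s).filter (fun p => p.2 > l)).map (fun p : Int × Int => p.1)).length
      = (ft.filter (fun t => l < t)).length := by
  induction ft with
  | nil => intro s; simp [PySem.List.enumerate_nil]
  | cons t ts ih =>
      intro s
      rw [PySem.List.enumerate_cons]
      by_cases ht : t > l
      · simp only [List.filter_cons, ht, decide_true, if_true, List.map_cons, List.length_cons]
        rw [ih (s + 1)]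
      · simp only [List.filter_cons, ht, decide_false]
        exact ih (s + 1)

-- ===== VERDICT (by name: the statement is the Claim_ definition above) =====
theorem solution_spec : Claim_equal_solution := by
  intro ft k _ hpre
  unfold Spec_solution solution solution_alt
  by_cases hsum : ft.sum ≤ k
  · simp [hsum]
  · rw [if_neg hsum, if_neg hsum]
    push Not at hsum
    have hne : ft ≠ [] := by
      intro h
      subst h
      simp at hsum
      rcases hpre with h | h
      · exact h rfl
      · omega
    have hnpos : (0:Int) < (ft.length : Int) := by
      have : 0 < ft.length := List.length_pos_iff.2 hne
      exact_mod_cast this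
    -- A's initial bracket
    have hl0 : pySumMin ft (PySem.Int.floordiv k (ft.length : Int)) ≤ k := by
      have h1 := pySumMin_le_len_mul ft (PySem.Int.floordiv k (ft.length : Int))
      have h2 : (ft.length : Int) * PySem.Int.floordiv k (ft.length : Int) ≤ k := by
        have := (PySem.Int.le_floordiv_iff_mul_le hnpos).1
          (le_rfl : PySem.Int.floordiv k (ft.length : Int) ≤ _)
        nlinarith
      omega
    have hu0 : ¬ pySumMin ft ((PySem.List.max? ft (fun t => t)).getD 0) ≤ k := by
      obtain ⟨m, hm⟩ : ∃ m, PySem.List.max? ft (fun t => t) = some m := by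
        rcases h : PySem.List.max? ft (fun t => t) with _ | m
        · exact absurd ((PySem.List.max?_eq_none_iff _ _).1 h) hne
        · exact ⟨m, rfl⟩
      rw [hm]
      simp only [Option.getD_some]
      rw [pySumMin_eq_sum_of_le ft m (fun t ht => PySem.List.max?_isMax hm t ht)]
      omega
    have hA := pyBisect_spec ft k ((((PySem.List.max? ft (fun t => t)).getD 0) - PySem.Int.floordiv k (ft.length : Int)).toNat)
      (PySem.Int.floordiv k (ft.length : Int)) ((PySem.List.max? ft (fun t => t)).getD 0) le_rfl hl0 hu0
    have hB := altGo_spec ft k hne hsum (PySem.List.sorted ft (fun t => t) false) [] 0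
      (((PySem.List.sorted ft (fun t => t) false).length : Int))
      (by simp) (by simp) (by simp) (by simp)
    rw [PySem.List.length_sorted] at hB
    obtain ⟨hfml, hBle, hBgt⟩ := hB
    show (pyFind (pyBisect ft k (PySem.Int.floordiv k (ft.length : Int)) ((PySem.List.max? ft (fun t => t)).getD 0)) (k - pySumMin ft (pyBisect ft k (PySem.Int.floordiv k (ft.length : Int)) ((PySem.List.max? ft (fun t => t)).getD 0))) (PySem.List.enumerate ft) 0).getD 0
      = (PySem.List.pyGet? (((PySem.List.enumerate ft).filter (fun p => p.2 > (PySem.Int.floordiv (k - (altGo k (PySem.List.sorted ft (fun t => t) false) 0 (ft.length : Int)).1) (altGo k (PySem.List.sorted ft (fun t => t) false) 0 (ft.length : Int)).2))).map (fun p => p.1))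
          (k - ((altGo k (PySem.List.sorted ft (fun t => t) false) 0 (ft.length : Int)).1 + (altGo k (PySem.List.sorted ft (fun t => t) false) 0 (ft.length : Int)).2 * (PySem.Int.floordiv (k - (altGo k (PySem.List.sorted ft (fun t => t) false) 0 (ft.length : Int)).1) (altGo k (PySem.List.sorted ft (fun t => t) false) 0 (ft.length : Int)).2)))).getD 0 + 1

    set e := (altGo k (PySem.List.sorted ft (fun t => t) false) 0 ((ft.length : Int))).1 with hedef
    set r := (altGo k (PySem.List.sorted ft (fun t => t) false) 0 ((ft.length : Int))).2 with hrdef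
    set lB := PySem.Int.floordiv (k - e) r with hlBdef
    set lA := pyBisect ft k (PySem.Int.floordiv k (ft.length : Int))
      ((PySem.List.max? ft (fun t => t)).getD 0) with hlAdef
    have hAB : lA = lB := level_uniq ft k hA.1 hA.2 hBle hBgt
    rw [hAB]
    -- B's offset equals k - S(lB)
    have hoff : k - (e + r * lB) = k - pySumMin ft lB := by rw [hfml]
    have hnn : 0 ≤ k - pySumMin ft lB := by omega
    set j := (k - pySumMin ft lB).toNat with hjdef
    have hjv : k - pySumMin ft lB = (j : Int) := by omega
    rw [pyFind_eq lB (k - pySumMin ft lB) (PySem.List.enumerate ft) 0 j (by omega)]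
    have hcnt : j < (((PySem.List.enumerate ft).filter (fun p => p.2 > lB)).map
        (fun p : Int × Int => p.1)).length := by
      rw [enum_filter_len ft lB 0]
      have := pySumMin_succ ft lB
      omega
    obtain ⟨v, hv⟩ : ∃ v, (((PySem.List.enumerate ft).filter (fun p => p.2 > lB)).map
        (fun p : Int × Int => p.1))[j]? = some v :=
      ⟨_, List.getElem?_eq_getElem hcnt⟩
    rw [hv, hoff, hjv, PySem.List.pyGet?_natCast, hv]
    simp
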